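-- pv_equiv track=rewrite | github.com/Karna-Balaji-07/DSA_Sheet | Hashing/3121. Count the Number of Special Characters II.py | solutions1
-- ===== SOURCE A (Python) =====
-- def solutions1(words):
--     lower ={}
--     upper  = {}
--     for key, value in enumerate(words):
--         if value.islower():
--             if value not in lower:
--                 lower[value] = []
--             lower[value].append(key)
--         elif value.isupper():
--             if value not in upper:
--                 upper[value] = key
--     uppers = dict(sorted(upper.items()))
--     lowers = dict(sorted(lower.items()))
--
--     count = 0
--     for key, value in uppers.items():
--         low = key.lower()
--         if low in lowers:
--             if all(index < value for index in lower[low]):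
--                 count +=1
--     return count
-- ===== SOURCE B (Python) =====
-- def solutions1(words):
--     last_lower = {}
--     first_upper = {}
--     for i, ch in enumerate(words):
--         if ch.islower():
--             last_lower[ch] = i
--         elif ch.isupper() and ch not in first_upper:
--             first_upper[ch] = i
--     count = 0
--     for ch, first in first_upper.items():
--         low = ch.lower()
--         if low in last_lower and last_lower[low] < first:
--             count += 1
--     return count
-- ===== Notes on version B (the rewrite author's own statement) =====
-- stated objective: simpler
-- what changed: B keeps only two scalar dicts (last index of each lowercase letter, first index of each uppercase letter) built in one pass and does a single comparison per letter, eliminating A's per-letter index lists, the two sorted() re-dictings and the all() inner scan over every stored occurrence.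
import Mathlib
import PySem

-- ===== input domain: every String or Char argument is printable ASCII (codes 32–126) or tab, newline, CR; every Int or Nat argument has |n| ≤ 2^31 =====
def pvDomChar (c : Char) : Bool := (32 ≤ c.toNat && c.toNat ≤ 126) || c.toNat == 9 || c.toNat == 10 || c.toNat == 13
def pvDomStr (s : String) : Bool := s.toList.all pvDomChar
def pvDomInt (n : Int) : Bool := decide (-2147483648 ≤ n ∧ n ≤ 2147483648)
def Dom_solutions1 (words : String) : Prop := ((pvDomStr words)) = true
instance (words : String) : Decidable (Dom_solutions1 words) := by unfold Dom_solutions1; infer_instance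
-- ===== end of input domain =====

-- B replaces A's per-letter index lists, the two sorted() re-dictings and the all() inner scan by two
-- scalar dicts (last lowercase index, first uppercase index) and a single comparison per letter (objective: simpler).

-- ===== PORT A =====
-- one step of A's enumerate loop (kv = (key, value))
def pvStepA (s : PySem.Dict Char (List Int) × PySem.Dict Char Int) (kv : Int × Char) :
    PySem.Dict Char (List Int) × PySem.Dict Char Int :=
  if PySem.Chars.islower kv.2 then
    -- 'if value not in lower: lower[value] = []' then 'lower[value].append(key)'
    let lo := if s.1.contains kv.2 then s.1 else s.1.insert kv.2 []
    (lo.modify kv.2 [] (· ++ [kv.1]), s.2)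
  else if PySem.Chars.isupper kv.2 then
    (s.1, if s.2.contains kv.2 then s.2 else s.2.insert kv.2 kv.1)
  else s

-- A's counting loop over uppers = dict(sorted(upper.items())), lowers = dict(sorted(lower.items())).
-- upper's keys are distinct, so Python's tuple comparison in sorted() never reaches the second
-- component: sorting by the key (·.1) is exact here.
def pvCountA (lower : PySem.Dict Char (List Int)) (upper : PySem.Dict Char Int) : Int :=
  let uppers := PySem.Dict.ofList (PySem.List.sorted upper.items (fun p => p.1) false)
  let lowers := PySem.Dict.ofList (PySem.List.sorted lower.items (fun p => p.1) false)
  uppers.items.foldl (fun count kv =>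
    let low := PySem.Chars.lowerChar kv.1
    if lowers.contains low then
      -- 'lower[low]' is guarded by 'low in lowers' (same key set), so getD is exact
      if (lower.getD low []).all (fun index => decide (index < kv.2)) then count + 1 else count
    else count) 0

def solutions1 (words : String) : Int :=
  let p := (PySem.List.enumerate words.toList 0).foldl pvStepA (PySem.Dict.empty, PySem.Dict.empty)
  pvCountA p.1 p.2

-- ===== PORT B =====
def pvStepB (s : PySem.Dict Char Int × PySem.Dict Char Int) (kv : Int × Char) :
    PySem.Dict Char Int × PySem.Dict Char Int :=
  if PySem.Chars.islower kv.2 then (s.1.insert kv.2 kv.1, s.2)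
  else if PySem.Chars.isupper kv.2 && !(s.2.contains kv.2) then (s.1, s.2.insert kv.2 kv.1)
  else s

def pvCountB (last_lower first_upper : PySem.Dict Char Int) : Int :=
  first_upper.items.foldl (fun count kv =>
    let low := PySem.Chars.lowerChar kv.1
    if last_lower.contains low && decide (last_lower.getD low 0 < kv.2) then count + 1
    else count) 0

def solutions1_alt (words : String) : Int :=
  let p := (PySem.List.enumerate words.toList 0).foldl pvStepB (PySem.Dict.empty, PySem.Dict.empty)
  pvCountB p.1 p.2

-- ===== PRECONDITION & SPEC =====
def Spec_solutions1 (words : String) (out : Int) : Prop := out = solutions1_alt words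
instance (words : String) (out : Int) : Decidable (Spec_solutions1 words out) := by unfold Spec_solutions1; infer_instance

-- ===== CLAIM (what is proved, stated in full; the proofs are below) =====
def Claim_equal_solutions1 : Prop := ∀ (words : String), Dom_solutions1 words → Spec_solutions1 words (solutions1 words)

-- ===== LEMMAS AND PROOFS =====

-- the relation the two loops maintain (s = next enumerate index)
def pvInv (s : Int) (lo : PySem.Dict Char (List Int)) (up : PySem.Dict Char Int)
    (ll fu : PySem.Dict Char Int) : Prop :=
  up = fu ∧ lo.keys.Nodup ∧ up.keys.Nodup ∧
  (∀ c, lo.contains c = ll.contains c) ∧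
  (∀ c, lo.contains c = true →
     ll.getD c 0 ∈ lo.getD c [] ∧ ∀ i ∈ lo.getD c [], i ≤ ll.getD c 0) ∧
  (∀ c, ∀ i ∈ lo.getD c [], i < s)

theorem pvInv_step (s : Int) (lo : PySem.Dict Char (List Int)) (up ll fu : PySem.Dict Char Int)
    (v : Char) (h : pvInv s lo up ll fu) :
    pvInv (s + 1) (pvStepA (lo, up) (s, v)).1 (pvStepA (lo, up) (s, v)).2
      (pvStepB (ll, fu) (s, v)).1 (pvStepB (ll, fu) (s, v)).2 := by
  obtain ⟨h1, h2, h3, h4, h5, h6⟩ := h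
  by_cases hl : PySem.Chars.islower v = true
  · -- lowercase branch
    set base := if lo.contains v then lo else lo.insert v [] with hbase
    have hbC : ∀ c, base.contains c = (c == v || lo.contains c) := by
      intro c
      by_cases hc : lo.contains v = true
      · by_cases hcv : c = v <;> simp [hbase, hc, hcv]
      · simp [hbase, hc, PySem.Dict.contains_insert]
    have hbG : ∀ c, base.getD c [] = lo.getD c [] := by
      intro c
      by_cases hc : lo.contains v = true
      · simp [hbase, hc]
      · by_cases hcv : c = v
        · simp [hbase, hc, hcv,
            PySem.Dict.getD_of_not_contains lo ([] : List Int) (by simpa using hc)]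
        · simp [hbase, hc, PySem.Dict.getD_insert, hcv]
    have hbN : base.keys.Nodup := by
      by_cases hc : lo.contains v = true
      · simpa [hbase, hc] using h2
      · simpa [hbase, hc] using PySem.Dict.nodup_keys_insert lo v [] h2
    have hAC : ∀ c, (base.modify v [] (· ++ [s])).contains c = (c == v || lo.contains c) := by
      intro c
      rw [PySem.Dict.contains_modify, hbC]
      by_cases hcv : c = v <;> simp [hcv]
    have hAG : ∀ c, (base.modify v [] (· ++ [s])).getD c []
        = if c = v then lo.getD v [] ++ [s] else lo.getD c [] := by
      intro c; rw [PySem.Dict.getD_modify]; simp [hbG]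
    simp only [pvStepA, pvStepB, hl, if_true]
    refine ⟨h1, ?_, h3, ?_, ?_, ?_⟩
    · rw [PySem.Dict.keys_modify]
      exact PySem.Dict.nodup_keys_insert _ _ _ hbN
    · intro c
      rw [hAC, PySem.Dict.contains_insert, h4]
    · intro c hc
      rw [hAC] at hc
      rw [hAG, PySem.Dict.getD_insert]
      by_cases hcv : c = v
      · simp only [hcv, if_pos]
        refine ⟨by simp, ?_⟩
        intro i hi
        rcases List.mem_append.1 hi with hi | hi
        · exact le_of_lt (h6 v i hi)
        · simp at hi; omega
      · simp only [if_neg hcv]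
        exact h5 c (by simpa [hcv] using hc)
    · intro c i hi
      rw [hAG] at hi
      by_cases hcv : c = v
      · simp only [hcv, if_pos] at hi
        rcases List.mem_append.1 hi with hi | hi
        · have := h6 v i hi; omega
        · simp at hi; omega
      · simp only [if_neg hcv] at hi
        have := h6 c i hi; omega
  · by_cases hu : PySem.Chars.isupper v = true
    · simp only [pvStepA, pvStepB, hl, hu, if_true, Bool.true_and]
      by_cases hc : up.contains v = true
      · have hc' : fu.contains v = true := h1 ▸ hc
        simp only [hc, hc', if_true, Bool.not_true]
        refine ⟨h1, h2, h3, h4, h5, fun c i hi => by have := h6 c i hi; omega⟩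
      · have hc' : fu.contains v = false := by rw [← h1]; simpa using hc
        simp only [hc, hc', if_false, Bool.not_false, Bool.false_eq_true, if_true]
        refine ⟨by rw [h1], h2, PySem.Dict.nodup_keys_insert _ _ _ h3, h4, h5,
          fun c i hi => by have := h6 c i hi; omega⟩
    · simp only [pvStepA, pvStepB, hl, hu, Bool.false_and]
      refine ⟨h1, h2, h3, h4, h5, fun c i hi => by have := h6 c i hi; omega⟩

theorem pvInv_foldl (xs : List Char) : ∀ (s : Int) (lo : PySem.Dict Char (List Int))
    (up ll fu : PySem.Dict Char Int), pvInv s lo up ll fu →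
    pvInv (s + xs.length)
      ((PySem.List.enumerate xs s).foldl pvStepA (lo, up)).1
      ((PySem.List.enumerate xs s).foldl pvStepA (lo, up)).2
      ((PySem.List.enumerate xs s).foldl pvStepB (ll, fu)).1
      ((PySem.List.enumerate xs s).foldl pvStepB (ll, fu)).2 := by
  induction xs with
  | nil => intro s lo up ll fu h; simpa [PySem.List.enumerate_nil] using h
  | cons x xs ih =>
    intro s lo up ll fu h
    have h1 := pvInv_step s lo up ll fu x h
    have := ih (s + 1) _ _ _ _ h1
    simpa [PySem.List.enumerate_cons, List.foldl_cons, add_comm, add_left_comm, add_assoc] using this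

theorem pvItems_ofList {ν : Type} (pairs : List (Char × ν)) (h : (pairs.map (fun p => p.1)).Nodup) :
    (PySem.Dict.ofList pairs).items = pairs := by
  have hh := PySem.Dict.items_foldl_insert_fresh pairs (fun p => p.1) (fun p => p.2) PySem.Dict.empty
    (by intro a _; simp [PySem.Dict.contains_empty]) h
  have he : PySem.Dict.ofList pairs = List.foldl (fun d a => d.insert a.1 a.2) PySem.Dict.empty pairs := rfl
  rw [he, hh]
  simp [PySem.Dict.empty]

-- sorting a dict's items keeps the key column duplicate-free
theorem pvSortedNodup {ν : Type} (d : PySem.Dict Char ν) (h : d.keys.Nodup) :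
    ((PySem.List.sorted d.items (fun p => p.1) false).map (fun p => p.1)).Nodup := by
  have hperm := (PySem.List.sorted_perm d.items (fun p => p.1) false).map (fun p => p.1)
  have : d.items.map (fun p => p.1) = d.keys := rfl
  exact hperm.nodup_iff.mpr (this ▸ h)

theorem pvContains_sortedDict {ν : Type} (d : PySem.Dict Char ν) (h : d.keys.Nodup) (c : Char) :
    (PySem.Dict.ofList (PySem.List.sorted d.items (fun p => p.1) false)).contains c = d.contains c := by
  rw [PySem.Dict.contains_eq_decide_mem_keys, PySem.Dict.contains_eq_decide_mem_keys]
  have hk : (PySem.Dict.ofList (PySem.List.sorted d.items (fun p => p.1) false)).keys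
      = (PySem.List.sorted d.items (fun p => p.1) false).map (fun p => p.1) := by
    rw [show ∀ (e : PySem.Dict Char ν), e.keys = e.items.map (fun p => p.1) from fun _ => rfl,
      pvItems_ofList _ (pvSortedNodup d h)]
  rw [hk]
  have hmem : c ∈ (PySem.List.sorted d.items (fun p => p.1) false).map (fun p => p.1) ↔ c ∈ d.keys :=
    ((PySem.List.sorted_perm d.items (fun p => p.1) false).map (fun p => p.1)).mem_iff
  simp [hmem, PySem.Dict.keys]

theorem pvCount_eq (s : Int) (lo : PySem.Dict Char (List Int)) (up ll fu : PySem.Dict Char Int)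
    (h : pvInv s lo up ll fu) : pvCountA lo up = pvCountB ll fu := by
  obtain ⟨h1, h2, h3, h4, h5, _⟩ := h
  unfold pvCountA pvCountB
  simp only []
  rw [pvItems_ofList _ (pvSortedNodup up h3)]
  -- both loops are countP's
  rw [show (fun (count : Int) (kv : Char × Int) =>
        if (PySem.Dict.ofList (PySem.List.sorted lo.items (fun p => p.1) false)).contains (PySem.Chars.lowerChar kv.1) then
          if (lo.getD (PySem.Chars.lowerChar kv.1) []).all (fun index => decide (index < kv.2)) then count + 1 else count
        else count)
      = (fun (count : Int) kv =>
        if ((PySem.Dict.ofList (PySem.List.sorted lo.items (fun p => p.1) false)).contains (PySem.Chars.lowerChar kv.1)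
            && (lo.getD (PySem.Chars.lowerChar kv.1) []).all (fun index => decide (index < kv.2))) then count + 1 else count)
      from by
        funext count kv
        by_cases hc : (PySem.Dict.ofList (PySem.List.sorted lo.items (fun p => p.1) false)).contains (PySem.Chars.lowerChar kv.1) = true
          <;> simp [hc]]
  rw [PySem.List.foldl_if_add_one, PySem.List.foldl_if_add_one]
  rw [(PySem.List.sorted_perm up.items (fun p => p.1) false).countP_eq, ← h1]
  congr 1
  apply congrArg
  apply List.countP_congr
  intro kv _
  rw [pvContains_sortedDict lo h2, h4]
  constructor
  · intro hx
    simp only [Bool.and_eq_true] at hx ⊢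
    refine ⟨hx.1, ?_⟩
    obtain ⟨hm, hle⟩ := h5 (PySem.Chars.lowerChar kv.1) (by rw [h4]; exact hx.1)
    have := List.all_eq_true.1 hx.2 _ hm
    simpa using this
  · intro hx
    simp only [Bool.and_eq_true] at hx ⊢
    refine ⟨hx.1, ?_⟩
    obtain ⟨hm, hle⟩ := h5 (PySem.Chars.lowerChar kv.1) (by rw [h4]; exact hx.1)
    refine List.all_eq_true.2 ?_
    intro i hi
    have h1 := hle i hi
    have h2 := of_decide_eq_true hx.2
    simp; omega

-- ===== VERDICT (by name: the statement is the Claim_ definition above) =====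
theorem solutions1_spec : Claim_equal_solutions1 := by
  intro words _
  unfold Spec_solutions1 solutions1 solutions1_alt
  have h0 : pvInv 0 PySem.Dict.empty PySem.Dict.empty PySem.Dict.empty PySem.Dict.empty := by
    refine ⟨rfl, ?_, ?_, ?_, ?_, ?_⟩ <;>
      simp [PySem.Dict.contains_empty, PySem.Dict.getD_empty]
  have h := pvInv_foldl words.toList 0 _ _ _ _ h0
  exact pvCount_eq _ _ _ _ _ h
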